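-- pv_equiv track=rewrite | github.com/RickyQzh/REAL-TSE-Challenge | utils/aggregate_eval_summary.py | ordered_names
-- ===== SOURCE A (Python) =====
-- from typing import Dict, Iterable, List, Sequence
--
-- def ordered_names(names: Iterable[str], preferred: Sequence[str]) -> List[str]:
--     clean = [str(name) for name in names if str(name)]
--     seen = set()
--     ordered = []
--     for name in preferred:
--         if name in clean and name not in seen:
--             ordered.append(name)
--             seen.add(name)
--     for name in sorted(clean):
--         if name not in seen:
--             ordered.append(name)
--             seen.add(name)
--     return ordered
-- ===== SOURCE B (Python) =====
-- def ordered_names(names, preferred):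
--     clean = {str(n) for n in names if str(n)}
--     idx = {}
--     for i, p in enumerate(preferred):
--         idx.setdefault(p, i)
--     L = len(preferred)
--     def key(n):
--         i = idx.get(n)
--         return (i, "") if i is not None else (L, n)
--     return sorted(clean, key=key)
-- ===== Notes on version B (the rewrite author's own statement) =====
-- stated objective: faster
-- what changed: A builds the result with two appending loops over a shared mutable seen-set, the first scanning the clean list for membership once per preferred name; B instead builds a first-occurrence index of preferred once and produces the whole result as a single sort of the distinct clean names under the composite key (index, '') / (len(preferred), name).
import Mathlib
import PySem

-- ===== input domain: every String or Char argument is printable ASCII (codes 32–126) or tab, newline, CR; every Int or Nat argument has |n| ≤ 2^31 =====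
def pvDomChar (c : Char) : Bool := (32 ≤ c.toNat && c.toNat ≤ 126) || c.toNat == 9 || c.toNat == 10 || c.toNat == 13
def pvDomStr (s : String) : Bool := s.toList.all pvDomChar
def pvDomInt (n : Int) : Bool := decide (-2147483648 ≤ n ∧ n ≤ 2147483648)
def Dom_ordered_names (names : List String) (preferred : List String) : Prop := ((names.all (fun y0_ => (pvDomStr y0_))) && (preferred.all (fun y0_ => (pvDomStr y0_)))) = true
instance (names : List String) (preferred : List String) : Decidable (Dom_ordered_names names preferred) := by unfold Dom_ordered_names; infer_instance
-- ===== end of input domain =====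

-- B replaces A's two append loops (the second preceded by a list-membership scan per preferred name) by one composite-key sort.

-- ===== PORT A =====
-- 'str(name)' applied to a str is the identity; 'if str(name)' keeps the non-empty strings.
def ordered_names (names : List String) (preferred : List String) : List String :=
  let clean : List String := names.filter (fun n => n != "")
  let st1 : PySem.Set String × List String :=
    preferred.foldl
      (fun st name =>
        if clean.contains name && !(PySem.Set.contains st.1 name) then
          (PySem.Set.add st.1 name, st.2 ++ [name])
        else st)
      (PySem.Set.empty, [])
  let st2 : PySem.Set String × List String :=
    (PySem.List.sorted clean (fun x => x) false).foldl
      (fun st name =>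
        if !(PySem.Set.contains st.1 name) then
          (PySem.Set.add st.1 name, st.2 ++ [name])
        else st)
      st1
  st2.2

-- ===== PORT B =====
-- the set comprehension {str(n) for n in names if str(n)} (consumed only through a sort whose key is
-- injective on it); idx.setdefault(p, i) keeps the FIRST index; the tuple key (i, "") / (L, n) is
-- sorted2's two components.
def ordered_names_alt (names : List String) (preferred : List String) : List String :=
  let clean : PySem.Set String := PySem.Set.ofList (names.filter (fun n => n != ""))
  let idx : PySem.Dict String Int :=
    (PySem.List.enumerate preferred).foldl (fun d p => d.setdefault p.2 p.1) PySem.Dict.empty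
  let L : Int := preferred.length
  PySem.List.sorted2 clean
    (fun n => match idx.get? n with | some i => i | none => L)
    (fun n => match idx.get? n with | some _ => "" | none => n)
    false

-- ===== PRECONDITION & SPEC =====
def Spec_ordered_names (names : List String) (preferred : List String) (out : List String) : Prop := out = ordered_names_alt names preferred
instance (names : List String) (preferred : List String) (out : List String) : Decidable (Spec_ordered_names names preferred out) := by unfold Spec_ordered_names; infer_instance

-- ===== CLAIM (what is proved, stated in full; the proofs are below) =====
def Claim_equal_ordered_names : Prop := ∀ (names : List String) (preferred : List String), Dom_ordered_names names preferred → Spec_ordered_names names preferred (ordered_names names preferred)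

-- ===== LEMMAS AND PROOFS =====

-- B's first-occurrence index dict
def pvIdxD (preferred : List String) : PySem.Dict String Int :=
  (PySem.List.enumerate preferred).foldl (fun d p => d.setdefault p.2 p.1) PySem.Dict.empty

-- B's two key components
def pvK1 (preferred : List String) : String → Int :=
  fun n => match (pvIdxD preferred).get? n with | some i => i | none => preferred.length

def pvK2 (preferred : List String) : String → String :=
  fun n => match (pvIdxD preferred).get? n with | some _ => "" | none => n

-- the elements appended by A's first loop, as a recursion over `preferred`
def pvSel1 (clean : List String) : List String → List String → List String
  | [], _ => []
  | p :: t, s =>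
    if clean.contains p && !(PySem.Set.contains s p) then p :: pvSel1 clean t (s ++ [p])
    else pvSel1 clean t s

-- the elements appended by A's second loop
def pvSel2 : List String → List String → List String
  | [], _ => []
  | p :: t, s => if !(PySem.Set.contains s p) then p :: pvSel2 t (s ++ [p]) else pvSel2 t s

lemma pv_alt_eq (names preferred : List String) :
    ordered_names_alt names preferred =
      PySem.List.sorted2 (PySem.Set.ofList (names.filter (fun n => n != "")))
        (pvK1 preferred) (pvK2 preferred) false := rfl

lemma pvSel1_cons_pos (clean : List String) {p : String} (t s : List String)
    (h1 : p ∈ clean) (h2 : p ∉ s) :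
    pvSel1 clean (p :: t) s = p :: pvSel1 clean t (s ++ [p]) := by
  simp [pvSel1, h1, h2]

lemma pvSel1_cons_neg (clean : List String) {p : String} (t s : List String)
    (h : p ∈ clean → p ∈ s) :
    pvSel1 clean (p :: t) s = pvSel1 clean t s := by
  simp only [pvSel1]
  rw [if_neg]
  simp only [Bool.and_eq_true, not_and, List.contains_iff_mem, Bool.not_eq_eq_eq_not, Bool.not_true]
  intro h1
  simp [h (by simpa using h1)]

lemma pv_foldl1_eq (clean : List String) :
    ∀ (pref : List String) (s o : List String),
      pref.foldl
        (fun (st : PySem.Set String × List String) name =>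
          if clean.contains name && !(PySem.Set.contains st.1 name) then
            (PySem.Set.add st.1 name, st.2 ++ [name])
          else st) (s, o)
      = (s ++ pvSel1 clean pref s, o ++ pvSel1 clean pref s) := by
  intro pref
  induction pref with
  | nil => intro s o; simp [pvSel1]
  | cons p t ih =>
    intro s o
    simp only [List.foldl_cons]
    by_cases h : (clean.contains p && !(PySem.Set.contains s p)) = true
    · rw [Bool.and_eq_true] at h
      have hmem : p ∈ clean := by simpa using h.1
      have hnot : p ∉ s := by simpa [PySem.Set.contains_iff] using h.2
      rw [if_pos (by simpa [PySem.Set.contains_iff, hmem] using hnot),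
        PySem.Set.add_of_not_mem hnot, ih, pvSel1_cons_pos clean t s hmem hnot]
      simp
    · have himp : p ∈ clean → p ∈ s := by
        intro hc
        by_contra hs
        exact h (by simp [hc, hs])
      rw [if_neg h, ih, pvSel1_cons_neg clean t s himp]

lemma pv_mem_sel1 (clean : List String) :
    ∀ (pref s : List String) (x : String),
      x ∈ pvSel1 clean pref s ↔ x ∈ pref ∧ x ∈ clean ∧ x ∉ s := by
  intro pref
  induction pref with
  | nil => intro s x; simp [pvSel1]
  | cons p t ih =>
    intro s x
    by_cases hp : p ∈ clean ∧ p ∉ s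
    · rw [pvSel1_cons_pos clean t s hp.1 hp.2]
      simp only [List.mem_cons, ih]
      constructor
      · rintro (rfl | ⟨hx1, hx2, hx3⟩)
        · exact ⟨Or.inl rfl, hp.1, hp.2⟩
        · simp only [List.mem_append, List.mem_singleton, not_or] at hx3
          exact ⟨Or.inr hx1, hx2, hx3.1⟩
      · rintro ⟨hx0 | hx1, hx2, hx3⟩
        · exact Or.inl hx0
        · by_cases hxp : x = p
          · exact Or.inl hxp
          · exact Or.inr ⟨hx1, hx2, by simp [hx3, hxp]⟩
    · have himp : p ∈ clean → p ∈ s := fun hc => by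
        by_contra hs; exact hp ⟨hc, hs⟩
      rw [pvSel1_cons_neg clean t s himp]
      simp only [List.mem_cons, ih]
      constructor
      · rintro ⟨hx1, hx2, hx3⟩; exact ⟨Or.inr hx1, hx2, hx3⟩
      · rintro ⟨hx0 | hx1, hx2, hx3⟩
        · subst hx0; exact absurd (himp hx2) hx3
        · exact ⟨hx1, hx2, hx3⟩

lemma pvSel2_cons_pos {p : String} (t s : List String) (h : p ∉ s) :
    pvSel2 (p :: t) s = p :: pvSel2 t (s ++ [p]) := by
  simp [pvSel2, h]

lemma pvSel2_cons_neg {p : String} (t s : List String) (h : p ∈ s) :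
    pvSel2 (p :: t) s = pvSel2 t s := by
  simp [pvSel2, h]

lemma pv_foldl2_eq :
    ∀ (l : List String) (s o : List String),
      l.foldl
        (fun (st : PySem.Set String × List String) name =>
          if !(PySem.Set.contains st.1 name) then
            (PySem.Set.add st.1 name, st.2 ++ [name])
          else st) (s, o)
      = (s ++ pvSel2 l s, o ++ pvSel2 l s) := by
  intro l
  induction l with
  | nil => intro s o; simp [pvSel2]
  | cons p t ih =>
    intro s o
    simp only [List.foldl_cons]
    by_cases h : p ∈ s
    · rw [if_neg (by simpa [PySem.Set.contains_iff] using h), ih, pvSel2_cons_neg t s h]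
    · rw [if_pos (by simpa [PySem.Set.contains_iff] using h),
        PySem.Set.add_of_not_mem h, ih, pvSel2_cons_pos t s h]
      simp

lemma pv_mem_sel2 :
    ∀ (l s : List String) (x : String), x ∈ pvSel2 l s ↔ x ∈ l ∧ x ∉ s := by
  intro l
  induction l with
  | nil => intro s x; simp [pvSel2]
  | cons p t ih =>
    intro s x
    by_cases h : p ∈ s
    · rw [pvSel2_cons_neg t s h]
      simp only [List.mem_cons, ih]
      constructor
      · rintro ⟨hx1, hx2⟩; exact ⟨Or.inr hx1, hx2⟩
      · rintro ⟨hx0 | hx1, hx2⟩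
        · subst hx0; exact absurd h hx2
        · exact ⟨hx1, hx2⟩
    · rw [pvSel2_cons_pos t s h]
      simp only [List.mem_cons, ih]
      constructor
      · rintro (rfl | ⟨hx1, hx2⟩)
        · exact ⟨Or.inl rfl, h⟩
        · simp only [List.mem_append, List.mem_singleton, not_or] at hx2
          exact ⟨Or.inr hx1, hx2.1⟩
      · rintro ⟨hx0 | hx1, hx2⟩
        · exact Or.inl hx0
        · by_cases hxp : x = p
          · exact Or.inl hxp
          · exact Or.inr ⟨hx1, by simp [hx2, hxp]⟩

lemma pv_sel2_sublist : ∀ (l s : List String), List.Sublist (pvSel2 l s) l := by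
  intro l
  induction l with
  | nil => intro s; simp [pvSel2]
  | cons p t ih =>
    intro s
    by_cases h : p ∈ s
    · rw [pvSel2_cons_neg t s h]; exact (ih s).cons p
    · rw [pvSel2_cons_pos t s h]; exact (ih (s ++ [p])).cons₂ p

lemma pv_nodup_sel2 : ∀ (l s : List String), (pvSel2 l s).Nodup := by
  intro l
  induction l with
  | nil => intro s; simp [pvSel2]
  | cons p t ih =>
    intro s
    by_cases h : p ∈ s
    · rw [pvSel2_cons_neg t s h]; exact ih s
    · rw [pvSel2_cons_pos t s h]
      refine List.nodup_cons.2 ⟨?_, ih _⟩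
      intro hmem
      exact ((pv_mem_sel2 t (s ++ [p]) p).1 hmem).2 (by simp)

lemma pv_sublist_discard {l m : List String} (p : String)
    (hs : List.Sublist l m) (hne : ∀ a ∈ l, a ≠ p) :
    List.Sublist l (PySem.Set.discard m p) := by
  have hf : l.filter (fun y => !(y == p)) = l :=
    List.filter_eq_self.2 (fun a ha => by simpa using hne a ha)
  have := List.Sublist.filter (fun y => !(y == p)) hs
  rw [hf] at this
  exact this

lemma pv_sel1_sublist_dedup (clean : List String) :
    ∀ (pref s : List String), List.Sublist (pvSel1 clean pref s) (PySem.List.dedup pref) := by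
  intro pref
  induction pref with
  | nil => intro s; simp [pvSel1, PySem.List.dedup]
  | cons p t ih =>
    intro s
    rw [PySem.List.dedup_eq_ofList, PySem.Set.ofList_cons]
    have hofl : List.Sublist (pvSel1 clean t (s ++ [p])) (PySem.Set.ofList t) := by
      rw [← PySem.List.dedup_eq_ofList]; exact ih _
    have hofl' : List.Sublist (pvSel1 clean t s) (PySem.Set.ofList t) := by
      rw [← PySem.List.dedup_eq_ofList]; exact ih _
    by_cases hp : p ∈ clean ∧ p ∉ s
    · rw [pvSel1_cons_pos clean t s hp.1 hp.2]
      refine List.Sublist.cons₂ p (pv_sublist_discard p hofl ?_)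
      intro a ha
      have := ((pv_mem_sel1 clean t (s ++ [p]) a).1 ha).2.2
      simp only [List.mem_append, List.mem_singleton, not_or] at this
      exact this.2
    · have himp : p ∈ clean → p ∈ s := fun hc => by
        by_contra hs; exact hp ⟨hc, hs⟩
      rw [pvSel1_cons_neg clean t s himp]
      refine List.Sublist.cons p (pv_sublist_discard p hofl' ?_)
      intro a ha
      have hmem := (pv_mem_sel1 clean t s a).1 ha
      intro heq
      subst heq
      exact hmem.2.2 (himp hmem.2.1)

-- the idx-building fold records each key's first-occurrence index
lemma pv_idx_fold_get? (n : String) :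
    ∀ (l : List String) (start : Int) (d : PySem.Dict String Int),
      ((PySem.List.enumerate l start).foldl (fun d p => d.setdefault p.2 p.1) d).get? n
      = match d.get? n with
        | some v => some v
        | none => (PySem.List.index? l n).map (fun k => start + (k : Int)) := by
  intro l
  induction l with
  | nil =>
    intro start d
    simp only [PySem.List.enumerate_nil, List.foldl_nil, PySem.List.index?]
    cases d.get? n <;> simp
  | cons x t ih =>
    intro start d
    rw [PySem.List.enumerate_cons]
    simp only [List.foldl_cons]
    rw [ih]
    by_cases hx : n = x
    · subst hx
      rw [PySem.Dict.get?_setdefault_self]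
      cases hd : d.get? n with
      | some v => simp
      | none =>
        simp only [Option.getD_none]
        rw [PySem.List.index?_cons_self]
        simp
    · rw [PySem.Dict.get?_setdefault_of_ne d _ hx]
      cases hd : d.get? n with
      | some v => simp
      | none =>
        rw [PySem.List.index?_cons_of_ne t (fun h => hx h.symm)]
        cases hi : PySem.List.index? t n <;> simp
        omega

lemma pv_idxD_get? (preferred : List String) (n : String) :
    (pvIdxD preferred).get? n = (PySem.List.index? preferred n).map (fun k => (k : Int)) := by
  rw [pvIdxD, pv_idx_fold_get? n preferred 0 PySem.Dict.empty]
  rw [PySem.Dict.get?_empty]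
  simp

lemma pv_k1_of_index? {preferred : List String} {n : String} {k : Nat}
    (h : PySem.List.index? preferred n = some k) : pvK1 preferred n = (k : Int) := by
  unfold pvK1
  rw [pv_idxD_get?, h]
  simp

lemma pv_k1_of_not_mem {preferred : List String} {n : String} (h : n ∉ preferred) :
    pvK1 preferred n = (preferred.length : Int) := by
  unfold pvK1
  rw [pv_idxD_get?, (PySem.List.index?_eq_none_iff _ _).2 h]
  simp

lemma pv_k2_of_not_mem {preferred : List String} {n : String} (h : n ∉ preferred) :
    pvK2 preferred n = n := by
  unfold pvK2
  rw [pv_idxD_get?, (PySem.List.index?_eq_none_iff _ _).2 h]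
  simp

-- first-occurrence indices strictly increase along dedup
lemma pv_dedup_pairwise_index? (l : List String) :
    (PySem.List.dedup l).Pairwise
      (fun a b => (PySem.List.index? l a).getD 0 < (PySem.List.index? l b).getD 0) := by
  induction l using List.reverseRecOn with
  | nil => simp [PySem.List.dedup]
  | append_singleton xs x ih =>
    rw [PySem.List.dedup_eq_ofList, PySem.Set.ofList_append_singleton]
    by_cases hx : x ∈ xs
    · rw [PySem.Set.add_of_mem (by simpa [PySem.Set.mem_ofList] using hx)]
      rw [PySem.List.dedup_eq_ofList] at ih
      refine ih.imp_of_mem ?_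
      intro a b ha hb hab
      rw [PySem.List.index?_append_of_mem [x] (by simpa [PySem.Set.mem_ofList] using ha),
        PySem.List.index?_append_of_mem [x] (by simpa [PySem.Set.mem_ofList] using hb)]
      exact hab
    · rw [PySem.Set.add_of_not_mem (by simpa [PySem.Set.mem_ofList] using hx)]
      rw [PySem.List.dedup_eq_ofList] at ih
      rw [List.pairwise_append]
      refine ⟨ih.imp_of_mem ?_, by simp, ?_⟩
      · intro a b ha hb hab
        rw [PySem.List.index?_append_of_mem [x] (by simpa [PySem.Set.mem_ofList] using ha),
          PySem.List.index?_append_of_mem [x] (by simpa [PySem.Set.mem_ofList] using hb)]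
        exact hab
      · intro a ha b hb
        simp only [List.mem_singleton] at hb
        subst hb
        have hax : a ∈ xs := by simpa [PySem.Set.mem_ofList] using ha
        rw [PySem.List.index?_append_of_mem [b] hax,
          PySem.List.index?_append_singleton_self xs b hx]
        cases hia : PySem.List.index? xs a with
        | none =>
          rw [PySem.List.index?_eq_none_iff] at hia
          exact absurd hax hia
        | some k =>
          obtain ⟨hk, -, -⟩ := PySem.List.getElem_of_index?_eq_some hia
          simpa using hk

-- sorted2 with two keys is sorted with the lexicographic key
lemma pv_sorted2_eq_sorted_lex (xs : List String) (k1 : String → Int) (k2 : String → String) :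
    PySem.List.sorted2 xs k1 k2 false = PySem.List.sorted xs (fun n => toLex (k1 n, k2 n)) false := by
  rw [PySem.List.sorted_eq_foldl_insertBy]
  show List.foldl _ [] xs = _
  have hbefore : (fun a b => decide (k1 a < k1 b) || (!decide (k1 b < k1 a) && decide (k2 a < k2 b)))
      = (fun a b : String => decide ((toLex (k1 a, k2 a)) < (toLex (k1 b, k2 b)))) := by
    funext a b
    rcases lt_trichotomy (k1 a) (k1 b) with h | h | h
    · simp [Prod.Lex.lt_iff, h, not_lt_of_gt h]
    · simp [Prod.Lex.lt_iff, h]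
    · simp [Prod.Lex.lt_iff, h, not_lt_of_gt h, ne_of_gt h]
  simp only [hbefore, Bool.false_eq_true, if_false]

-- ===== VERDICT (by name: the statement is the Claim_ definition above) =====
theorem ordered_names_spec : Claim_equal_ordered_names := by
  intro names preferred _
  show ordered_names names preferred = ordered_names_alt names preferred
  -- names and shapes
  set clean : List String := names.filter (fun n => n != "") with hclean
  set sc : List String := PySem.List.sorted clean (fun x => x) false with hsc
  set P : List String := pvSel1 clean preferred [] with hP
  set R : List String := pvSel2 sc P with hR
  -- A's value is P ++ R
  have hA : ordered_names names preferred = P ++ R := by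
    rw [ordered_names]
    rw [show (PySem.Set.empty : PySem.Set String) = ([] : List String) from rfl]
    rw [pv_foldl1_eq clean preferred [] []]
    simp only [List.nil_append]
    rw [pv_foldl2_eq sc P P]
  -- membership and distinctness facts
  have hmemP : ∀ x, x ∈ P ↔ x ∈ preferred ∧ x ∈ clean := by
    intro x; rw [hP, pv_mem_sel1]; simp
  have hmemR : ∀ x, x ∈ R ↔ x ∈ clean ∧ x ∉ P := by
    intro x; rw [hR, pv_mem_sel2]; rw [hsc, PySem.List.mem_sorted]
  have hRnotpref : ∀ x, x ∈ R → x ∉ preferred := by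
    intro x hx hpref
    have h1 := (hmemR x).1 hx
    exact h1.2 ((hmemP x).2 ⟨hpref, h1.1⟩)
  have hPclean : ∀ x, x ∈ P → x ∈ clean := fun x hx => ((hmemP x).1 hx).2
  have hnodupP : P.Nodup :=
    (PySem.List.nodup_dedup preferred).sublist (pv_sel1_sublist_dedup clean preferred [])
  have hnodupR : R.Nodup := pv_nodup_sel2 sc P
  have hnodup : (P ++ R).Nodup := by
    rw [List.nodup_append]
    refine ⟨hnodupP, hnodupR, ?_⟩
    intro a ha b hb heq
    subst heq
    exact ((hmemR a).1 hb).2 ha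
  -- P ++ R is a permutation of the clean set
  have hperm : (P ++ R).Perm (PySem.Set.ofList clean) := by
    rw [List.perm_ext_iff_of_nodup hnodup (PySem.Set.nodup_ofList clean)]
    intro a
    rw [List.mem_append, PySem.Set.mem_ofList]
    constructor
    · rintro (h | h)
      · exact hPclean a h
      · exact ((hmemR a).1 h).1
    · intro h
      by_cases hp : a ∈ P
      · exact Or.inl hp
      · exact Or.inr ((hmemR a).2 ⟨h, hp⟩)
  -- P ++ R is strictly increasing under B's lexicographic key
  have hpair : (P ++ R).Pairwise
      (fun a b => (fun n => toLex (pvK1 preferred n, pvK2 preferred n)) a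
        < (fun n => toLex (pvK1 preferred n, pvK2 preferred n)) b) := by
    have hidx : ∀ x ∈ P, ∃ k : Nat, PySem.List.index? preferred x = some k ∧ k < preferred.length := by
      intro x hx
      have hxm : x ∈ preferred := ((hmemP x).1 hx).1
      cases hia : PySem.List.index? preferred x with
      | none => rw [PySem.List.index?_eq_none_iff] at hia; exact absurd hxm hia
      | some k =>
        obtain ⟨hk, -, -⟩ := PySem.List.getElem_of_index?_eq_some hia
        exact ⟨k, rfl, hk⟩
    rw [List.pairwise_append]
    refine ⟨?_, ?_, ?_⟩
    · -- within P: the first component strictly increases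
      have h0 : P.Pairwise (fun a b =>
          (PySem.List.index? preferred a).getD 0 < (PySem.List.index? preferred b).getD 0) :=
        (pv_dedup_pairwise_index? preferred).sublist (pv_sel1_sublist_dedup clean preferred [])
      refine h0.imp_of_mem ?_
      intro a b ha hb hab
      obtain ⟨ka, hka, -⟩ := hidx a ha
      obtain ⟨kb, hkb, -⟩ := hidx b hb
      rw [hka, hkb] at hab
      simp only [Option.getD_some] at hab
      show toLex (pvK1 preferred a, pvK2 preferred a) < toLex (pvK1 preferred b, pvK2 preferred b)
      rw [Prod.Lex.lt_iff]
      simp only [ofLex_toLex]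
      left
      rw [pv_k1_of_index? hka, pv_k1_of_index? hkb]
      exact_mod_cast hab
    · -- within R: first components agree, the strings strictly increase
      have hle : R.Pairwise (fun a b => a ≤ b) := by
        have := PySem.List.sorted_pairwise clean (fun x => x)
        rw [← hsc] at this
        exact this.sublist (pv_sel2_sublist sc P)
      have hlt : R.Pairwise (fun a b => a < b) :=
        (hle.and hnodupR).imp (fun h => lt_of_le_of_ne h.1 h.2)
      refine hlt.imp_of_mem ?_
      intro a b ha hb hab
      show toLex (pvK1 preferred a, pvK2 preferred a) < toLex (pvK1 preferred b, pvK2 preferred b)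
      rw [Prod.Lex.lt_iff]
      simp only [ofLex_toLex]
      right
      constructor
      · rw [pv_k1_of_not_mem (hRnotpref a ha), pv_k1_of_not_mem (hRnotpref b hb)]
      · rw [pv_k2_of_not_mem (hRnotpref a ha), pv_k2_of_not_mem (hRnotpref b hb)]
        exact hab
    · -- across: a preferred name's index is below len(preferred)
      intro a ha b hb
      obtain ⟨ka, hka, hlt⟩ := hidx a ha
      show toLex (pvK1 preferred a, pvK2 preferred a) < toLex (pvK1 preferred b, pvK2 preferred b)
      rw [Prod.Lex.lt_iff]
      simp only [ofLex_toLex]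
      left
      rw [pv_k1_of_index? hka, pv_k1_of_not_mem (hRnotpref b hb)]
      exact_mod_cast hlt
  -- B sorts the clean set by that key, which names exactly P ++ R
  rw [hA, pv_alt_eq, pv_sorted2_eq_sorted_lex]
  exact (PySem.List.sorted_eq_of_perm_of_pairwise_lt _ _ _ hperm hpair).symm
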